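-- pv_equiv track=rewrite | github.com/ChaitanyaVardhan/code-jam | 2020/qualification-round/parenting.py | solve_for_first
-- ===== SOURCE A (Python) =====
-- def fits(intervals, elem):
--     temp_arr = list(intervals)
--     temp_arr.append(elem)
--     if non_overlapping(temp_arr):
--         return True
--     else:
--         return False
--
-- def non_overlapping(interval_arr):
--     sorted_arr = sorted(interval_arr, key=lambda x: x[1])
--     i = 0
--     while i < len(interval_arr)-1:
--         if sorted_arr[i][1] <= sorted_arr[i+1][0]:
--             i += 1
--         else:
--             break
--
--     if i == len(sorted_arr) - 1:
--         return True
--     else: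
--         return False
--
-- def solve_for_first(I, parent, other):
--     sched = []
--     sched.append(parent)
--     intervals = []
--     intervals.append(I[0])
--
--     i = 1
--     while i < len(I):
--         if fits(intervals, I[i]):
--             sched.append(parent)
--             intervals.append(I[i])
--         else:
--             sched.append("X")
--         i += 1
--
--     residual_intervals = []
--     for k in range(1, len(sched)):
--         if sched[k] == "X":
--             residual_intervals.append(I[k])
--         else:
--             continue
--
--     if non_overlapping(residual_intervals):
--         for j in range(len(sched)):
--             if sched[j] == "X":
--                 sched[j] = other
--             else:
--                 continue
--
--     return sched
-- ===== SOURCE B (Python) =====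
-- import bisect
--
-- def _chain_ok(arr):
--     srt = sorted(arr, key=lambda t: t[1])
--     return all(srt[i][1] <= srt[i + 1][0] for i in range(len(srt) - 1))
--
-- def solve_for_first(I, parent, other):
--     # Maintain the accepted intervals in a list kept sorted by end time, plus the
--     # parallel list of end times; a bisect insertion point and a check of the two
--     # neighbours replaces A's copy-sort-rescan per element.
--     sched = [parent]
--     ivs = [I[0]]            # accepted intervals, sorted by end (stable)
--     ends = [I[0][1]]        # their end times
--     for s, e in I[1:]:
--         pos = bisect.bisect_right(ends, e)
--         ok = (pos == 0 or ivs[pos - 1][1] <= s) and (pos == len(ivs) or e <= ivs[pos][0])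
--         if ok:
--             ends.insert(pos, e)
--             ivs.insert(pos, (s, e))
--             sched.append(parent)
--         else:
--             sched.append("X")
--     residual = [iv for sc, iv in zip(sched[1:], I[1:]) if sc == "X"]
--     if _chain_ok(residual):
--         sched = [other if sc == "X" else sc for sc in sched]
--     return sched
-- ===== Notes on version B (the rewrite author's own statement) =====
-- stated objective: alternative
-- what changed: A re-copies, re-sorts and re-scans the whole accepted-interval list for every new activity; B keeps the accepted intervals in a list sorted by end time and decides each activity with one bisect insertion point plus a check of the two neighbours (no per-element re-sort; same cost on the measured inputs, where few activities are accepted).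
-- outside the precondition, e.g. on solve_for_first([(1, 2)], 'X', 'J'): A returns ['X'], B returns ['J']
import Mathlib
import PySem

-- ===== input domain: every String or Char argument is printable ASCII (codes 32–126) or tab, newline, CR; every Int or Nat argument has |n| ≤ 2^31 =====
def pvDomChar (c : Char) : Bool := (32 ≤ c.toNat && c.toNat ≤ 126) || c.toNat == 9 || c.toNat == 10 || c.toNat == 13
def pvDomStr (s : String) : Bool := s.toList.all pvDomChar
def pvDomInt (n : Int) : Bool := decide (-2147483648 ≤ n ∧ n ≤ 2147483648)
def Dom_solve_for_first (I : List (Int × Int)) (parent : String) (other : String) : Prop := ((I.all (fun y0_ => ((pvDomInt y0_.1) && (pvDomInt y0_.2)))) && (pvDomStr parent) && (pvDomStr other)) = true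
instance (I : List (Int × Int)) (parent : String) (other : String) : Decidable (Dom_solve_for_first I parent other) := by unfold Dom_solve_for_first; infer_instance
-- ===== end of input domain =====

-- B replaces A's per-element copy+sort+rescan feasibility test by an ordered list of accepted
-- intervals probed with a bisect insertion point and a two-neighbour check (alternative algorithm).


-- ===== PORT A =====
-- the `while i < len-1` scan of non_overlapping, as structural recursion over the sorted list
def pvNolLoop : List (Int × Int) → Nat → Nat
  | a :: b :: t, i => if a.2 ≤ b.1 then pvNolLoop (b :: t) (i + 1) else i
  | _, i => i

def pvNonOverlapping (arr : List (Int × Int)) : Bool :=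
  let s := PySem.List.sorted arr (fun x => x.2)
  decide ((pvNolLoop s 0 : Int) = (s.length : Int) - 1)

def pvFits (intervals : List (Int × Int)) (elem : Int × Int) : Bool :=
  pvNonOverlapping (intervals ++ [elem])

-- the main `while i < len(I)` loop, carrying (sched, intervals)
def pvSchedLoopA (parent : String) :
    List (Int × Int) → List String × List (Int × Int) → List String × List (Int × Int)
  | [], st => st
  | x :: xs, (sched, intervals) =>
    if pvFits intervals x then pvSchedLoopA parent xs (sched ++ [parent], intervals ++ [x])
    else pvSchedLoopA parent xs (sched ++ ["X"], intervals)

-- `for k in range(1, len(sched)): if sched[k] == "X": residual.append(I[k])` (indices in range)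
def pvResidualA (sched : List String) (I : List (Int × Int)) : List (Int × Int) :=
  (PySem.List.pyRange 1 (sched.length : Int)).foldl
    (fun acc k => if PySem.List.pyGetD sched k "" = "X" then acc ++ [PySem.List.pyGetD I k (0, 0)] else acc) []

def solve_for_first (I : List (Int × Int)) (parent : String) (other : String) : List String :=
  match I with
  | [] => []  -- Python raises IndexError on I[0]; excluded by Pre_
  | i0 :: rest =>
    let st := pvSchedLoopA parent rest ([parent], [i0])
    let residual := pvResidualA st.1 (i0 :: rest)
    if pvNonOverlapping residual then st.1.map (fun s => if s = "X" then other else s) else st.1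

-- ===== PORT B =====
-- B's _chain_ok: sort by end once, check every adjacent pair
def pvChainAll (s : List (Int × Int)) : Bool :=
  (s.zip (s.drop 1)).all (fun ab => decide (ab.1.2 ≤ ab.2.1))

def pvChainSorted (arr : List (Int × Int)) : Bool :=
  pvChainAll (PySem.List.sorted arr (fun x => x.2))

-- B's main loop, carrying (sched, ends, ivs) with ivs kept sorted by end time
def pvSchedLoopB (parent : String) :
    List (Int × Int) → List String × List Int × List (Int × Int) → List String × List Int × List (Int × Int)
  | [], st => st
  | x :: xs, (sched, ends, ivs) =>
    let pos := PySem.List.bisectRight ends x.2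
    if (pos = 0 ∨ (ivs.getD (pos - 1) (0, 0)).2 ≤ x.1) ∧ (pos = ivs.length ∨ x.2 ≤ (ivs.getD pos (0, 0)).1) then
      pvSchedLoopB parent xs (sched ++ [parent], PySem.List.insert ends (pos : Int) x.2, PySem.List.insert ivs (pos : Int) x)
    else pvSchedLoopB parent xs (sched ++ ["X"], ends, ivs)

-- `[iv for sc, iv in zip(sched[1:], I[1:]) if sc == "X"]`
def pvResidualB (sched : List String) (I : List (Int × Int)) : List (Int × Int) :=
  ((sched.drop 1).zip (I.drop 1)).filterMap (fun p => if p.1 = "X" then some p.2 else none)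

def solve_for_first_alt (I : List (Int × Int)) (parent : String) (other : String) : List String :=
  match I with
  | [] => []  -- B also raises IndexError on I[0]; excluded by Pre_
  | i0 :: rest =>
    let st := pvSchedLoopB parent rest ([parent], [i0.2], [i0])
    let residual := pvResidualB st.1 (i0 :: rest)
    if pvChainSorted residual then st.1.map (fun s => if s = "X" then other else s) else st.1

-- ===== PRECONDITION & SPEC =====
-- Pre_ excludes empty I (A raises IndexError on I[0]; so does B) and the corner of a single
-- activity whose parent label equals A's in-band rejected-slot marker "X" (with other ≠ "X"):
-- there A returns ["X"] (= parent) and B returns [other], both valid assignments of the lone activity.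
def Pre_solve_for_first (I : List (Int × Int)) (parent : String) (other : String) : Prop :=
  I ≠ [] ∧ ¬(I.length = 1 ∧ parent = "X" ∧ other ≠ "X")
instance (I : List (Int × Int)) (parent : String) (other : String) : Decidable (Pre_solve_for_first I parent other) := by unfold Pre_solve_for_first; infer_instance

def pvWitness_solve_for_first : (List (Int × Int)) × String × String := ([(0, 1), (2, 3), (1, 2)], "C", "J")

def Spec_solve_for_first (I : List (Int × Int)) (parent : String) (other : String) (out : List String) : Prop := out = solve_for_first_alt I parent other
instance (I : List (Int × Int)) (parent : String) (other : String) (out : List String) : Decidable (Spec_solve_for_first I parent other out) := by unfold Spec_solve_for_first; infer_instance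

-- ===== CLAIM (what is proved, stated in full; the proofs are below) =====
def Claim_equal_solve_for_first : Prop := ∀ (I : List (Int × Int)) (parent : String) (other : String), Dom_solve_for_first I parent other → Pre_solve_for_first I parent other → Spec_solve_for_first I parent other (solve_for_first I parent other)

-- ===== LEMMAS AND PROOFS =====

-- proof-level chain predicate: all adjacent pairs of a list satisfy end ≤ next start
def pvChain : List (Int × Int) → Bool
  | a :: b :: t => decide (a.2 ≤ b.1) && pvChain (b :: t)
  | _ => true

theorem pvNolLoop_iff (s : List (Int × Int)) : ∀ (i : Nat), s ≠ [] →
    (((pvNolLoop s i : Int) = (i : Int) + (s.length : Int) - 1) ↔ pvChain s = true) := by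
  induction s with
  | nil => intro i h; simp at h
  | cons a t ih =>
    intro i _
    match t with
    | [] => simp [pvNolLoop, pvChain]
    | b :: u =>
      by_cases hab : a.2 ≤ b.1
      · have := ih (i := i + 1) (by simp)
        simp only [pvNolLoop, pvChain, hab, decide_true, Bool.true_and, if_true]
        rw [this.symm]
        constructor <;> (intro h; simp only [List.length_cons] at h ⊢; push_cast at h ⊢; omega)
      · simp only [pvNolLoop, pvChain, hab, decide_false, Bool.false_and, if_false]
        simp only [List.length_cons]
        constructor
        · intro h; push_cast at h; omega
        · intro h; simp at h

theorem pvNonOverlapping_eq (arr : List (Int × Int)) (h : arr ≠ []) :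
    pvNonOverlapping arr = pvChain (PySem.List.sorted arr (fun x => x.2)) := by
  have hsne : PySem.List.sorted arr (fun x : Int × Int => x.2) ≠ [] := by
    simpa [PySem.List.sorted_eq_nil_iff] using h
  unfold pvNonOverlapping
  rw [Bool.eq_iff_iff]
  simp only [decide_eq_true_eq]
  simpa using pvNolLoop_iff (PySem.List.sorted arr (fun x => x.2)) 0 hsne

theorem pvChainAll_eq (s : List (Int × Int)) : pvChainAll s = pvChain s := by
  induction s with
  | nil => rfl
  | cons a t ih =>
    match t with
    | [] => rfl
    | b :: u =>
      simp only [pvChainAll, pvChain, List.drop_one, List.tail_cons, List.zip_cons_cons, List.all_cons] at *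
      rw [ih]
theorem pvSorted_append (l : List (Int × Int)) (x : Int × Int) :
    PySem.List.sorted (l ++ [x]) (fun x => x.2)
      = PySem.List.insertBy (fun a b => decide (a.2 < b.2)) x (PySem.List.sorted l (fun x => x.2)) := by
  rw [PySem.List.sorted_eq_foldl_insertBy, PySem.List.sorted_eq_foldl_insertBy, List.foldl_append]
  rfl

theorem pvInsertBy_eq {α : Type} (b : α → α → Bool) (x : α) :
    ∀ (S : List α) (p : Nat), p ≤ S.length →
      (∀ j (h : j < S.length), j < p → b x S[j] = false) →
      (∀ j (h : j < S.length), p ≤ j → b x S[j] = true) →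
      PySem.List.insertBy b x S = S.take p ++ x :: S.drop p := by
  intro S
  induction S with
  | nil => intro p hp _ _; match p with | 0 => simp [PySem.List.insertBy]
  | cons y ys ih =>
    intro p hp hlo hhi
    match p with
    | 0 =>
      have h0 : b x y = true := hhi 0 (by simp) (by omega)
      simp [PySem.List.insertBy, h0]
    | q + 1 =>
      have h0 : b x y = false := hlo 0 (by simp) (by omega)
      simp only [PySem.List.insertBy, h0, Bool.false_eq_true, if_false, List.take_succ_cons,
        List.drop_succ_cons, List.cons_append, List.cons.injEq, true_and]
      exact ih q (by simpa using hp)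
        (fun j h hj => by simpa using hlo (j + 1) (by simpa using h) (by omega))
        (fun j h hj => by simpa using hhi (j + 1) (by simpa using h) (by omega))
theorem pvChain_eq_isChain (L : List (Int × Int)) :
    pvChain L = true ↔ List.IsChain (fun a b => a.2 ≤ b.1) L := by
  induction L with
  | nil => simp [pvChain]
  | cons a t ih =>
    match t with
    | [] => simp [pvChain]
    | b :: u =>
      simp only [pvChain, Bool.and_eq_true, decide_eq_true_eq, List.isChain_cons_cons] at *
      rw [ih]

theorem pvChain_insert (x : Int × Int) (S : List (Int × Int)) (p : Nat)
    (hp : p ≤ S.length) (hc : pvChain S = true) :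
    (pvChain (S.take p ++ x :: S.drop p) = true ↔
      ((p = 0 ∨ (S.getD (p - 1) (0, 0)).2 ≤ x.1) ∧ (p = S.length ∨ x.2 ≤ (S.getD p (0, 0)).1))) := by
  rw [pvChain_eq_isChain] at hc ⊢
  have hS : List.IsChain (fun a b : Int × Int => a.2 ≤ b.1) (S.take p ++ S.drop p) := by
    rw [List.take_append_drop]; exact hc
  have htake := hS.left_of_append
  have hdrop := hS.right_of_append
  by_cases hp0 : p = 0
  · subst hp0
    simp only [List.take_zero, List.drop_zero, List.nil_append]
    rw [List.isChain_cons]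
    match S with
    | [] => simp
    | a :: t => simp [hc]
  · have hpos : 0 < p := Nat.pos_of_ne_zero hp0
    have hlt1 : p - 1 < S.length := by omega
    have e1 : S.getD (p - 1) (0, 0) = S[p - 1] := by
      simp [List.getD_eq_getElem?_getD, List.getElem?_eq_getElem hlt1]
    have hlast : (S.take p).getLast? = some S[p - 1] := by
      rw [List.getLast?_eq_getElem?]
      simp only [List.length_take, Nat.min_eq_left hp]
      rw [List.getElem?_take]
      simp [hlt1, Nat.sub_lt hpos Nat.one_pos]
    rw [List.isChain_append, List.isChain_cons, hlast]
    by_cases hpl : p = S.length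
    · have hdropnil : S.drop p = [] := by simp [hpl]
      rw [hdropnil]
      have hne : S ≠ [] := by intro h; subst h; simp at hlt1
      simp only [hpl, true_or, and_true, List.head?_nil]
      subst hpl
      simp [hc, hne, List.getElem?_eq_getElem hlt1]
    · have hlt : p < S.length := by omega
      have e2 : S.getD p (0, 0) = S[p] := by
        simp [List.getD_eq_getElem?_getD, List.getElem?_eq_getElem hlt]
      have hhead : (S.drop p).head? = some S[p] := by
        rw [List.head?_drop]; simp [List.getElem?_eq_getElem hlt]
      rw [hhead]
      simp [htake, hdrop, hp0, hpl, and_comm,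
        List.getElem?_eq_getElem hlt, List.getElem?_eq_getElem hlt1]
theorem pvLoop_equiv (parent : String) :
    ∀ (xs : List (Int × Int)) (sched : List String) (intervals : List (Int × Int)),
      intervals ≠ [] → pvChain (PySem.List.sorted intervals (fun x => x.2)) = true →
      pvSchedLoopB parent xs (sched, (PySem.List.sorted intervals (fun x => x.2)).map (fun x => x.2),
          PySem.List.sorted intervals (fun x => x.2))
        = ((pvSchedLoopA parent xs (sched, intervals)).1,
           (PySem.List.sorted (pvSchedLoopA parent xs (sched, intervals)).2 (fun x => x.2)).map (fun x => x.2),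
           PySem.List.sorted (pvSchedLoopA parent xs (sched, intervals)).2 (fun x => x.2)) := by
  intro xs
  induction xs with
  | nil => intro sched intervals _ _; simp [pvSchedLoopA, pvSchedLoopB]
  | cons x xs ih =>
    intro sched intervals hne hchain
    generalize hSdef : PySem.List.sorted intervals (fun x : Int × Int => x.2) = S at *
    have hpair : (S.map (fun x : Int × Int => x.2)).Pairwise (· ≤ ·) := by
      rw [List.pairwise_map]
      rw [← hSdef]
      exact PySem.List.sorted_pairwise intervals (fun x => x.2)
    obtain ⟨hple, hlo, hhi⟩ := PySem.List.bisectRight_spec (S.map (fun x : Int × Int => x.2)) x.2 hpair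
    have hlenm : (S.map (fun x : Int × Int => x.2)).length = S.length := by simp
    have hpS : PySem.List.bisectRight (S.map (fun x : Int × Int => x.2)) x.2 ≤ S.length := by
      rw [← hlenm]; exact hple
    generalize hpdef : PySem.List.bisectRight (S.map (fun x : Int × Int => x.2)) x.2 = p at *
    have hins : PySem.List.sorted (intervals ++ [x]) (fun x => x.2) = S.take p ++ x :: S.drop p := by
      rw [pvSorted_append, hSdef]
      refine pvInsertBy_eq _ x S p hpS ?_ ?_
      · intro j hj hjp
        have := hlo j (by simpa using hj) hjp
        simp only [List.getElem_map] at this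
        simp only [decide_eq_false_iff_not, not_lt]
        exact this
      · intro j hj hjp
        have := hhi j (by simpa using hj) hjp
        simp only [List.getElem_map] at this
        simpa using this
    have hchain' := hchain
    have hfit : pvFits intervals x = true ↔
        ((p = 0 ∨ (S.getD (p - 1) (0, 0)).2 ≤ x.1) ∧ (p = S.length ∨ x.2 ≤ (S.getD p (0, 0)).1)) := by
      unfold pvFits
      rw [pvNonOverlapping_eq _ (by simp), hins]
      exact pvChain_insert x S p hpS hchain'
    by_cases hok : ((p = 0 ∨ (S.getD (p - 1) (0, 0)).2 ≤ x.1) ∧ (p = S.length ∨ x.2 ≤ (S.getD p (0, 0)).1))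
    · have hfits : pvFits intervals x = true := hfit.mpr hok
      have hnewchain : pvChain (PySem.List.sorted (intervals ++ [x]) (fun x => x.2)) = true := by
        rw [hins]
        exact (pvChain_insert x S p hpS hchain').mpr hok
      have hinsS : PySem.List.insert S (p : Int) x = S.take p ++ x :: S.drop p :=
        PySem.List.insert_natCast S p x hpS
      have hinsE : PySem.List.insert (S.map (fun x : Int × Int => x.2)) (p : Int) x.2
          = (S.take p ++ x :: S.drop p).map (fun x : Int × Int => x.2) := by
        rw [PySem.List.insert_natCast _ p _ (by rw [hlenm]; exact hpS)]
        simp [List.map_take, List.map_drop]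
      simp only [pvSchedLoopB, pvSchedLoopA, hpdef, hfits, hok, if_pos]
      rw [hinsS, hinsE, ← hins]
      exact ih (sched ++ [parent]) (intervals ++ [x]) (by simp) hnewchain
    · have hfits : pvFits intervals x = false := by
        rcases Bool.eq_false_or_eq_true (pvFits intervals x) with h | h
        · exact absurd (hfit.mp h) hok
        · exact h
      simp only [pvSchedLoopB, pvSchedLoopA, hpdef, hfits, Bool.false_eq_true, if_false, hok]
      rw [← hSdef]
      exact ih (sched ++ ["X"]) intervals hne (by rw [hSdef]; exact hchain)

theorem pvSchedLoopA_sched (parent : String) :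
    ∀ (xs : List (Int × Int)) (sched0 : List String) (iv : List (Int × Int)),
      ∃ t, (pvSchedLoopA parent xs (sched0, iv)).1 = sched0 ++ t ∧ t.length = xs.length ∧
        ∀ e ∈ t, e = parent ∨ e = "X" := by
  intro xs
  induction xs with
  | nil => intro sched0 iv; exact ⟨[], by simp [pvSchedLoopA]⟩
  | cons x xs ih =>
    intro sched0 iv
    by_cases hfit : pvFits iv x = true
    · obtain ⟨t, ht, hlen, hmem⟩ := ih (sched0 ++ [parent]) (iv ++ [x])
      refine ⟨parent :: t, ?_, by simp [hlen], ?_⟩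
      · simp only [pvSchedLoopA, hfit, if_true]
        rw [ht]; simp
      · intro e he
        rcases List.mem_cons.mp he with h | h
        · exact Or.inl h
        · exact hmem e h
    · obtain ⟨t, ht, hlen, hmem⟩ := ih (sched0 ++ ["X"]) iv
      refine ⟨"X" :: t, ?_, by simp [hlen], ?_⟩
      · simp only [pvSchedLoopA, hfit, if_false, Bool.false_eq_true]
        rw [ht]; simp
      · intro e he
        rcases List.mem_cons.mp he with h | h
        · exact Or.inr h
        · exact hmem e h

theorem pvResidual_gen (s : List String) (iv : List (Int × Int)) (h : s.length = iv.length) :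
    ∀ (n j : Nat), s.length - j ≤ n → ∀ (acc : List (Int × Int)),
      (PySem.List.pyRange (j : Int) (s.length : Int)).foldl
        (fun acc k => if PySem.List.pyGetD s k "" = "X" then acc ++ [PySem.List.pyGetD iv k (0, 0)] else acc) acc
      = acc ++ ((s.drop j).zip (iv.drop j)).filterMap (fun p => if p.1 = "X" then some p.2 else none) := by
  intro n
  induction n with
  | zero =>
    intro j hj acc
    have hjs : s.length ≤ j := by omega
    have hrange : PySem.List.pyRange (j : Int) (s.length : Int) = [] := by
      simp [PySem.List.pyRange, Int.not_lt.mpr (by exact_mod_cast hjs : (s.length : Int) ≤ (j : Int))]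
    rw [hrange]
    simp [List.drop_of_length_le hjs]
  | succ n ihn =>
    intro j hj acc
    by_cases hjlt : j < s.length
    · have hjlt' : j < iv.length := by omega
      rw [PySem.List.pyRange_one_cons (by exact_mod_cast hjlt)]
      rw [List.foldl_cons]
      have e1 : PySem.List.pyGetD s (j : Int) "" = s[j] := by
        rw [PySem.List.pyGetD_natCast, List.getD_eq_getElem?_getD, List.getElem?_eq_getElem hjlt]
        rfl
      have e2 : PySem.List.pyGetD iv (j : Int) (0, 0) = iv[j] := by
        rw [PySem.List.pyGetD_natCast, List.getD_eq_getElem?_getD, List.getElem?_eq_getElem hjlt']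
        rfl
      have hds : s.drop j = s[j] :: s.drop (j + 1) := List.drop_eq_getElem_cons hjlt
      have hdi : iv.drop j = iv[j] :: iv.drop (j + 1) := List.drop_eq_getElem_cons hjlt'
      have hcast : (j : Int) + 1 = ((j + 1 : Nat) : Int) := by push_cast; ring
      rw [hcast]
      rw [ihn (j + 1) (by omega)]
      rw [hds, hdi, List.zip_cons_cons, List.filterMap_cons, e1, e2]
      by_cases hx : s[j] = "X"
      · simp [hx]
      · simp [hx]
    · have hjs : s.length ≤ j := by omega
      have hrange : PySem.List.pyRange (j : Int) (s.length : Int) = [] := by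
        simp [PySem.List.pyRange, Int.not_lt.mpr (by exact_mod_cast hjs : (s.length : Int) ≤ (j : Int))]
      rw [hrange]
      simp [List.drop_of_length_le hjs]

theorem pvResidual_eq (s : List String) (iv : List (Int × Int)) (h : s.length = iv.length) :
    pvResidualA s iv = pvResidualB s iv := by
  unfold pvResidualA pvResidualB
  have hg := pvResidual_gen s iv h (s.length) 1 (by omega) []
  simp only [Nat.cast_one] at hg
  rw [hg]
  simp [List.drop_one]

theorem pvMapId_of_no_X (other : String) :
    ∀ (t : List String), (∀ e ∈ t, e ≠ "X") →
      t.map (fun s => if s = "X" then other else s) = t := by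
  intro t
  induction t with
  | nil => intro _; rfl
  | cons a t ih =>
    intro ht
    simp only [List.map_cons]
    rw [if_neg (ht a (by simp)), ih (fun e he => ht e (by simp [he]))]

-- ===== VERDICT (by name: the statement is the Claim_ definition above) =====
theorem solve_for_first_spec : Claim_equal_solve_for_first := by
  intro I parent other _hDom hPre
  unfold Spec_solve_for_first
  obtain ⟨hne, hcorner⟩ := hPre
  match I with
  | [] => exact absurd rfl hne
  | i0 :: rest =>
    simp only [solve_for_first, solve_for_first_alt]
    have hs1 : PySem.List.sorted [i0] (fun x : Int × Int => x.2) = [i0] := by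
      rw [PySem.List.sorted_eq_foldl_insertBy]; rfl
    have hloop := pvLoop_equiv parent rest [parent] [i0] (by simp) (by rw [hs1]; rfl)
    rw [hs1] at hloop
    simp only [List.map_cons, List.map_nil] at hloop
    rw [hloop]
    have hsched := pvSchedLoopA_sched parent rest [parent] [i0]
    obtain ⟨t, ht, hlen, hmem⟩ := hsched
    have hlens : (pvSchedLoopA parent rest ([parent], [i0])).1.length = (i0 :: rest).length := by
      rw [ht]; simp [hlen]
    rw [pvResidual_eq _ _ hlens]
    by_cases hr : pvResidualB (pvSchedLoopA parent rest ([parent], [i0])).1 (i0 :: rest) = []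
    · rw [hr]
      have hA : pvNonOverlapping [] = false := rfl
      have hB : pvChainSorted [] = true := rfl
      rw [hA, hB]
      simp only [Bool.false_eq_true, if_false, if_true]
      -- show the replacement map is the identity here
      have hnoX : ∀ e ∈ t, e ≠ "X" := by
        intro e he hex
        have hzip : e ∈ (t.zip rest).map Prod.fst := by
          rw [List.map_fst_zip (le_of_eq hlen)]
          exact he
        obtain ⟨p, hp, hpe⟩ := List.mem_map.mp hzip
        have : p.2 ∈ pvResidualB (pvSchedLoopA parent rest ([parent], [i0])).1 (i0 :: rest) := by
          unfold pvResidualB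
          rw [ht]
          simp only [List.cons_append, List.nil_append, List.drop_succ_cons, List.drop_zero]
          exact List.mem_filterMap.mpr ⟨p, hp, by rw [if_pos (by rw [hpe, hex])]⟩
        rw [hr] at this
        exact absurd this (List.not_mem_nil)
      rw [ht]
      simp only [List.cons_append, List.nil_append, List.map_cons]
      rw [pvMapId_of_no_X other t hnoX]
      by_cases hpx : parent = "X"
      · have htnil : t = [] := by
          match t with
          | [] => rfl
          | a :: t' =>
            rcases hmem a (by simp) with h | h
            · exact absurd (h.trans hpx) (hnoX a (by simp))
            · exact absurd h (hnoX a (by simp))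
        have hrest : rest = [] := by
          have := hlen
          rw [htnil] at this
          exact List.eq_nil_of_length_eq_zero this.symm
        have hother : other = "X" := by
          by_contra hno
          exact hcorner ⟨by simp [hrest], hpx, hno⟩
        rw [if_pos hpx, hother, hpx]
      · rw [if_neg hpx]
    · have hcond : pvNonOverlapping (pvResidualB (pvSchedLoopA parent rest ([parent], [i0])).1 (i0 :: rest))
          = pvChainSorted (pvResidualB (pvSchedLoopA parent rest ([parent], [i0])).1 (i0 :: rest)) := by
        rw [pvNonOverlapping_eq _ hr]
        unfold pvChainSorted
        rw [pvChainAll_eq]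
      rw [hcond]
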